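-- pv_equiv track=rewrite | github.com/fawrince/coursera | divisor.py | divisor_map
-- ===== SOURCE A (Python) =====
-- def divisor_map(inputs):
--     map_result = []
--     for i in inputs:
--         divisors = []
--         d = 2
--         while d <= i:
--             if i % d == 0:
--                 if not any(filter(lambda x: d % x == 0, divisors)):
--                     divisors.append(d)
--             d += 1 if d == 2 else 2
--         map_result.append([(d, i) for d in divisors])
--     return map_result
-- ===== SOURCE B (Python) =====
-- def divisor_map(inputs):
--     cache = {}
--     result = []
--     for i in inputs:
--         pairs = cache.get(i)
--         if pairs is None:
--             pairs = []
--             n = i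
--             d = 2
--             while d * d <= n:
--                 if n % d == 0:
--                     pairs.append((d, i))
--                     while n % d == 0:
--                         n //= d
--                 d += 1
--             if n > 1:
--                 pairs.append((n, i))
--             cache[i] = pairs
--         result.append(pairs)
--     return result
-- ===== Notes on version B (the rewrite author's own statement) =====
-- stated objective: faster
-- what changed: B replaces A's scan of every candidate d up to i (with an inner 'does any found divisor divide d' pass) by trial division up to sqrt(n) that divides each found prime factor out of n (appending the remaining cofactor if > 1), and memoises the result per distinct input value in a dict.
import Mathlib
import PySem

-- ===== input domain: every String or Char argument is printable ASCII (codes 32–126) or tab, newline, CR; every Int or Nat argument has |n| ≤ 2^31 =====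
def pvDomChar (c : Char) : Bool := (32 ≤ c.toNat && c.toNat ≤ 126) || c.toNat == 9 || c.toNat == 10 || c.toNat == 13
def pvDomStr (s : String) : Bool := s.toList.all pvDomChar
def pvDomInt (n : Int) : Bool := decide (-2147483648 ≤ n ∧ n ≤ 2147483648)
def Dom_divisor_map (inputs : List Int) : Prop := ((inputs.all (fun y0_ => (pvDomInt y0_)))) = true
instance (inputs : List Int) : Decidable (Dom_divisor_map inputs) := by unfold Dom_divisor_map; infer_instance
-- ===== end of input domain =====

-- B collects each input's prime divisors by trial division up to sqrt(n), dividing found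
-- factors out (A scans every candidate up to i), and memoises per distinct input value;
-- objective: faster.

-- ===== PORT A =====
-- A's inner while: d runs 2,3,5,7,… while d ≤ i; d is appended when i % d == 0 and
-- any(filter(lambda x: d % x == 0, divisors)) is false (any of the *truthy* filtered elements).
-- termination facts for the ports (cited by name in decreasing_by)
theorem int_le_mul_self (d : Int) : d ≤ d * d := by
  rcases le_total d 0 with h | h
  · exact le_trans h (Int.mul_nonneg_of_nonpos_of_nonpos h h)
  · rcases h.lt_or_eq with h1 | h1
    · exact le_mul_of_one_le_left h1.le h1
    · rw [← h1]; exact le_refl 0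

theorem divLoop_dec (i d : Int) (h : d ≤ i) :
    (i + 1 - (d + if d = 2 then 1 else 2)).toNat < (i + 1 - d).toNat := by
  have h2 : 0 < i + 1 - d := Int.sub_pos.mpr (Int.le_iff_lt_add_one.mp h)
  refine (Int.toNat_lt_toNat h2).mpr (sub_lt_sub_left ?_ (i + 1))
  split
  · exact lt_add_one d
  · exact lt_add_of_pos_right d two_pos

def divLoop (i d : Int) (divisors : List Int) : List Int :=
  if d ≤ i then
    divLoop i (d + if d = 2 then 1 else 2)
      (if PySem.Int.mod i d = 0 ∧
          ¬ ((divisors.filter (fun x => decide (PySem.Int.mod d x = 0))).any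
               (fun x => decide (x ≠ 0))) = true
       then divisors ++ [d] else divisors)
  else divisors
termination_by (i + 1 - d).toNat
decreasing_by
  rename_i h
  exact divLoop_dec i d h

def divisor_map (inputs : List Int) : List (List (Int × Int)) :=
  inputs.foldl (fun map_result i =>
    map_result ++ [(divLoop i 2 []).map (fun d => (d, i))]) []

-- ===== PORT B =====
-- inner `while n % d == 0: n //= d`; the `2 ≤ d ∧ 1 ≤ n` guard only makes the recursion
-- total: every call reached from divisor_map_alt satisfies it.
theorem stripFac_dec (n d : Int) (h : 2 ≤ d ∧ 1 ≤ n ∧ PySem.Int.mod n d = 0) :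
    (PySem.Int.floordiv n d).toNat < n.toNat := by
  have hd : (0:Int) < d := lt_of_lt_of_le two_pos h.1
  have h0 : (0:Int) < n := lt_of_lt_of_le one_pos h.2.1
  rw [PySem.Int.floordiv_eq_ediv_of_pos hd]
  refine (Int.toNat_lt_toNat h0).mpr ?_
  rw [Int.ediv_lt_iff_lt_mul hd]
  have := mul_lt_mul_of_pos_left (lt_of_lt_of_le one_lt_two h.1) h0
  rwa [mul_one] at this

def stripFac (n d : Int) : Int :=
  if 2 ≤ d ∧ 1 ≤ n ∧ PySem.Int.mod n d = 0 then stripFac (PySem.Int.floordiv n d) d else n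
termination_by n.toNat
decreasing_by
  rename_i h
  exact stripFac_dec n d h

-- stripFac never increases n (cited by altLoop's decreasing_by)
theorem stripFac_le (n d : Int) : stripFac n d ≤ n := by
  induction n using stripFac.induct (d := d) with
  | case1 n h ih =>
    rw [stripFac, if_pos h]
    refine le_trans ih ?_
    rw [PySem.Int.floordiv_eq_ediv_of_pos (lt_of_lt_of_le two_pos h.1)]
    exact Int.ediv_le_self d (le_of_lt (lt_of_lt_of_le one_pos h.2.1))
  | case2 n h => rw [stripFac, if_neg h]

theorem altLoop_dec1 (n d : Int) (h : d * d ≤ n) :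
    (stripFac n d + 1 - (d + 1)).toNat < (n + 1 - d).toNat := by
  have h2 : 0 < n + 1 - d :=
    Int.sub_pos.mpr (Int.le_iff_lt_add_one.mp (le_trans (int_le_mul_self d) h))
  refine (Int.toNat_lt_toNat h2).mpr ?_
  rw [Int.add_sub_add_right (stripFac n d) 1 d]
  exact lt_of_le_of_lt (sub_le_sub_right (stripFac_le n d) d)
    (sub_lt_sub_right (lt_add_one n) d)

theorem altLoop_dec2 (n d : Int) (h : d * d ≤ n) :
    (n + 1 - (d + 1)).toNat < (n + 1 - d).toNat := by
  have h2 : 0 < n + 1 - d :=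
    Int.sub_pos.mpr (Int.le_iff_lt_add_one.mp (le_trans (int_le_mul_self d) h))
  refine (Int.toNat_lt_toNat h2).mpr ?_
  rw [Int.add_sub_add_right n 1 d]
  exact sub_lt_sub_right (lt_add_one n) d

-- B's outer while: d runs 2,3,4,… while d*d ≤ n; appends (factor, i) pairs directly
def altLoop (i n d : Int) (pairs : List (Int × Int)) : List (Int × Int) :=
  if d * d ≤ n then
    if PySem.Int.mod n d = 0 then
      altLoop i (stripFac n d) (d + 1) (pairs ++ [(d, i)])
    else altLoop i n (d + 1) pairs
  else if 1 < n then pairs ++ [(n, i)] else pairs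
termination_by (n + 1 - d).toNat
decreasing_by
  · rename_i h _
    exact altLoop_dec1 n d h
  · rename_i h _
    exact altLoop_dec2 n d h

-- the loop body: `pairs = cache.get(i)`, computing and caching on a miss
def memoStep (st : PySem.Dict Int (List (Int × Int)) × List (List (Int × Int))) (i : Int) :
    PySem.Dict Int (List (Int × Int)) × List (List (Int × Int)) :=
  match st.1.get? i with
  | some pairs => (st.1, st.2 ++ [pairs])
  | none =>
    let pairs := altLoop i i 2 []
    (st.1.insert i pairs, st.2 ++ [pairs])

def divisor_map_alt (inputs : List Int) : List (List (Int × Int)) :=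
  (inputs.foldl memoStep (PySem.Dict.empty, [])).2

-- ===== PRECONDITION & SPEC =====
def Spec_divisor_map (inputs : List Int) (out : List (List (Int × Int))) : Prop := out = divisor_map_alt inputs
instance (inputs : List Int) (out : List (List (Int × Int))) : Decidable (Spec_divisor_map inputs out) := by unfold Spec_divisor_map; infer_instance

-- ===== CLAIM (what is proved, stated in full; the proofs are below) =====
def Claim_equal_divisor_map : Prop := ∀ (inputs : List Int), Dom_divisor_map inputs → Spec_divisor_map inputs (divisor_map inputs)

-- ===== LEMMAS AND PROOFS =====

-- the sorted list of prime divisors of i below bound b (the common characterisation)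
def pdList (i : Int) (b : Nat) : List Int :=
  ((List.range b).filter (fun p => decide (Nat.Prime p ∧ (p:Int) ∣ i))).map (fun p => (p : Int))

theorem mem_pdList {i : Int} {b : Nat} {q : Int} :
    q ∈ pdList i b ↔ ∃ p : Nat, p < b ∧ p.Prime ∧ (p:Int) ∣ i ∧ (p:Int) = q := by
  simp [pdList, List.mem_filter, List.mem_range]
  constructor
  · rintro ⟨p, ⟨hpb, hp, hd⟩, rfl⟩; exact ⟨p, hpb, hp, hd, rfl⟩
  · rintro ⟨p, hpb, hp, hd, rfl⟩; exact ⟨p, ⟨hpb, hp, hd⟩, rfl⟩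

theorem pdList_succ_pos {i : Int} {b : Nat} (h : b.Prime ∧ (b:Int) ∣ i) :
    pdList i (b+1) = pdList i b ++ [(b:Int)] := by
  simp [pdList, List.range_succ, List.filter_append, h.1, h.2]

theorem pdList_succ_neg {i : Int} {b : Nat} (h : ¬ (b.Prime ∧ (b:Int) ∣ i)) :
    pdList i (b+1) = pdList i b := by
  simp [pdList, List.range_succ, List.filter_append, h]

theorem pdList_stable {i : Int} {b c : Nat} (hbc : b ≤ c)
    (h : ∀ p : Nat, b ≤ p → p < c → ¬ (p.Prime ∧ (p:Int) ∣ i)) :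
    pdList i c = pdList i b := by
  induction c, hbc using Nat.le_induction with
  | base => rfl
  | succ c hc ih =>
    rw [pdList_succ_neg (h c hc (by omega)), ih (fun p hb hpc => h p hb (by omega))]

theorem exists_prime_dvd {m : Int} (h : 2 ≤ m) :
    ∃ p : Nat, p.Prime ∧ (p:Int) ∣ m ∧ (p:Int) ≤ m := by
  obtain ⟨p, hp, hd⟩ := Nat.exists_prime_and_dvd (n := m.toNat) (by omega)
  have hd' : (p:Int) ∣ m := by
    have := Int.natCast_dvd_natCast.mpr hd
    simpa [Int.toNat_of_nonneg (by omega : (0:Int) ≤ m)] using this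
  exact ⟨p, hp, hd', Int.le_of_dvd (by omega) hd'⟩

theorem composite_small_prime {d : Int} (hd : 2 ≤ d) (hnp : ¬ d.toNat.Prime) :
    ∃ p : Nat, p.Prime ∧ (p:Int) ∣ d ∧ (p:Int) < d := by
  obtain ⟨p, hp, hdvd, hle⟩ := exists_prime_dvd hd
  refine ⟨p, hp, hdvd, lt_of_le_of_ne hle (fun he => hnp ?_)⟩
  have : p = d.toNat := by omega
  rwa [← this]

theorem prime_int_dvd_prime {p q : Nat} (hp : p.Prime) (hq : q.Prime)
    (h : (p:Int) ∣ (q:Int)) : (p:Int) = (q:Int) := by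
  have := (Nat.prime_dvd_prime_iff_eq hp hq).mp (Int.natCast_dvd_natCast.mp h)
  exact_mod_cast congrArg (Nat.cast : Nat → Int) this

-- ===== stripFac properties =====
theorem stripFac_pos {n d : Int} (hn : 1 ≤ n) : 1 ≤ stripFac n d := by
  induction n using stripFac.induct (d := d) with
  | case1 n h ih =>
    rw [stripFac, if_pos h]
    obtain ⟨hd, hn', hm⟩ := h
    apply ih
    rw [PySem.Int.floordiv_eq_ediv_of_pos (by omega)]
    have hdvd : d ∣ n := (PySem.Int.mod_eq_zero_iff_dvd n d).mp hm
    have : d ≤ n := Int.le_of_dvd (by omega) hdvd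
    exact (Int.le_ediv_iff_mul_le (by omega)).mpr (by omega)
  | case2 n h => rw [stripFac, if_neg h]; exact hn

theorem stripFac_dvd (n d : Int) : stripFac n d ∣ n := by
  induction n using stripFac.induct (d := d) with
  | case1 n h ih =>
    rw [stripFac, if_pos h]
    obtain ⟨hd, hn, hm⟩ := h
    have hdvd : d ∣ n := (PySem.Int.mod_eq_zero_iff_dvd n d).mp hm
    rw [PySem.Int.floordiv_eq_ediv_of_pos (by omega)] at ih ⊢
    exact dvd_trans ih (Int.ediv_dvd_of_dvd hdvd)
  | case2 n h => rw [stripFac, if_neg h]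

theorem stripFac_not_dvd {n d : Int} (hd : 2 ≤ d) (hn : 1 ≤ n) : ¬ d ∣ stripFac n d := by
  induction n using stripFac.induct (d := d) with
  | case1 n h ih =>
    rw [stripFac, if_pos h]
    obtain ⟨hd', hn', hm⟩ := h
    apply ih
    rw [PySem.Int.floordiv_eq_ediv_of_pos (by omega)]
    have hdvd : d ∣ n := (PySem.Int.mod_eq_zero_iff_dvd n d).mp hm
    have : d ≤ n := Int.le_of_dvd (by omega) hdvd
    exact (Int.le_ediv_iff_mul_le (by omega)).mpr (by omega)
  | case2 n h =>
    rw [stripFac, if_neg h]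
    intro hdvd
    exact h ⟨hd, hn, (PySem.Int.mod_eq_zero_iff_dvd n d).mpr hdvd⟩

theorem stripFac_dvd_iff {n d : Int} {p : Nat} (hp : p.Prime) (hdp : d.toNat.Prime)
    (hne : (p:Int) ≠ d) (hd : 2 ≤ d) (hn : 1 ≤ n) :
    ((p:Int) ∣ stripFac n d ↔ (p:Int) ∣ n) := by
  induction n using stripFac.induct (d := d) with
  | case1 n h ih =>
    rw [stripFac, if_pos h]
    obtain ⟨hd', hn', hm⟩ := h
    have hdvd : d ∣ n := (PySem.Int.mod_eq_zero_iff_dvd n d).mp hm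
    have hq : 1 ≤ PySem.Int.floordiv n d := by
      rw [PySem.Int.floordiv_eq_ediv_of_pos (by omega)]
      have : d ≤ n := Int.le_of_dvd (by omega) hdvd
      exact (Int.le_ediv_iff_mul_le (by omega)).mpr (by omega)
    rw [ih hq]
    have hmul : n = PySem.Int.floordiv n d * d := by
      rw [PySem.Int.floordiv_eq_ediv_of_pos (by omega)]
      exact (Int.ediv_mul_cancel hdvd).symm
    constructor
    · intro hpq; rw [hmul]; exact Dvd.dvd.mul_right hpq d
    · intro hpn
      have hprime : Prime (p:Int) := Nat.prime_iff_prime_int.mp hp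
      rcases (hprime.dvd_mul.mp (hmul ▸ hpn)) with h1 | h2
      · exact h1
      · exfalso
        have hdcast : ((d.toNat : Nat) : Int) = d := by omega
        exact hne (hdcast ▸ prime_int_dvd_prime hp hdp (hdcast ▸ h2))
  | case2 n h => rw [stripFac, if_neg h]

-- ===== A-side invariant =====
theorem divLoop_inv (i : Int) (hi : 2 ≤ i) :
    ∀ k (d : Int), (i + 1 - d).toNat = k → (d = 2 ∨ (3 ≤ d ∧ d % 2 = 1)) →
    divLoop i d (pdList i d.toNat) = pdList i (i.toNat + 1) := by
  intro k
  induction k using Nat.strong_induction_on with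
  | _ k ih =>
    intro d hk hd
    have hd2 : 2 ≤ d := by rcases hd with h | h <;> omega
    rw [divLoop]
    by_cases hdi : d ≤ i
    · rw [if_pos hdi]
      have hcast : ((d.toNat : Nat) : Int) = d := by omega
      -- the candidate d is appended iff it is a prime divisor of i
      have hstep : (if PySem.Int.mod i d = 0 ∧
            ¬ (((pdList i d.toNat).filter (fun x => decide (PySem.Int.mod d x = 0))).any
                 (fun x => decide (x ≠ 0))) = true
          then pdList i d.toNat ++ [d] else pdList i d.toNat) = pdList i (d.toNat + 1) := by
        by_cases hp : d.toNat.Prime ∧ d ∣ i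
        · have hacc := pdList_succ_pos (i := i) (b := d.toNat) ⟨hp.1, by rw [hcast]; exact hp.2⟩
          rw [hcast] at hacc
          rw [if_pos, hacc]
          refine ⟨(PySem.Int.mod_eq_zero_iff_dvd i d).mpr hp.2, ?_⟩
          simp only [List.any_eq_true, List.mem_filter, decide_eq_true_eq]
          rintro ⟨x, ⟨hxmem, hxdvd⟩, hx0⟩
          obtain ⟨q, hqlt, hq, hqi, rfl⟩ := mem_pdList.mp hxmem
          have : (q:Int) ∣ d := (PySem.Int.mod_eq_zero_iff_dvd d (q:Int)).mp hxdvd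
          have := prime_int_dvd_prime hq hp.1 (hcast ▸ this)
          omega
        · rw [if_neg, pdList_succ_neg (fun hc => hp ⟨hc.1, hcast ▸ hc.2⟩)]
          rintro ⟨hmod, hany⟩
          have hdvd : d ∣ i := (PySem.Int.mod_eq_zero_iff_dvd i d).mp hmod
          have hnp : ¬ d.toNat.Prime := fun h => hp ⟨h, hdvd⟩
          obtain ⟨q, hq, hqd, hqlt⟩ := composite_small_prime hd2 hnp
          apply hany
          simp only [List.any_eq_true, List.mem_filter, decide_eq_true_eq]
          refine ⟨(q:Int), ⟨mem_pdList.mpr ⟨q, by omega, hq, hqd.trans hdvd, rfl⟩,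
            (PySem.Int.mod_eq_zero_iff_dvd d (q:Int)).mpr hqd⟩, ?_⟩
          have := hq.two_le; omega
      rw [hstep]
      rcases hd with rfl | hodd
      · -- d = 2, next candidate is 3
        rw [if_pos rfl]
        exact ih ((i + 1 - 3).toNat) (by omega) 3 rfl (Or.inr (by omega))
      · -- d odd, next candidate is d + 2; d + 1 is even > 2, hence not prime
        rw [if_neg (by omega : ¬ d = 2)]
        have heven : pdList i (d.toNat + 1) = pdList i ((d + 2).toNat) := by
          have h2 : (d + 2).toNat = d.toNat + 2 := by omega
          rw [h2]
          refine (pdList_stable (by omega) ?_).symm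
          rintro p hp1 hp2 ⟨hpp, -⟩
          have : p % 2 = 0 := by omega
          have := (Nat.Prime.even_iff hpp).mp (Nat.even_iff.mpr this)
          omega
        rw [heven]
        exact ih ((i + 1 - (d + 2)).toNat) (by omega) (d + 2) rfl (Or.inr (by omega))
    · rw [if_neg hdi]
      refine pdList_stable (by omega) ?_
      rintro p hp1 hp2 ⟨hpp, hpd⟩
      have := Int.le_of_dvd (by omega) hpd
      omega

-- ===== B-side invariant =====
theorem altLoop_inv (i : Int) (hi : 2 ≤ i) :
    ∀ k (n d : Int), (n + 1 - d).toNat = k → 2 ≤ d → 1 ≤ n → n ∣ i →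
    (∀ p : Nat, p.Prime → (p:Int) ∣ n → d ≤ (p:Int)) →
    (∀ p : Nat, p.Prime → d ≤ (p:Int) → ((p:Int) ∣ i ↔ (p:Int) ∣ n)) →
    altLoop i n d ((pdList i d.toNat).map (fun p => (p, i))) =
      (pdList i (i.toNat + 1)).map (fun p => (p, i)) := by
  intro k
  induction k using Nat.strong_induction_on with
  | _ k ih =>
    intro n d hk hd hn hni inv5 inv6
    have hcast : ((d.toNat : Nat) : Int) = d := by omega
    rw [altLoop]
    by_cases hdd : d * d ≤ n
    · have hdn : d ≤ n := by nlinarith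
      rw [if_pos hdd]
      by_cases hm : PySem.Int.mod n d = 0
      · rw [if_pos hm]
        have hdvd : d ∣ n := (PySem.Int.mod_eq_zero_iff_dvd n d).mp hm
        -- d is prime: a smaller prime factor of d would divide n, contradicting inv5
        have hdprime : d.toNat.Prime := by
          by_contra hnp
          obtain ⟨p, hp, hpd, hplt⟩ := composite_small_prime hd hnp
          have := inv5 p hp (hpd.trans hdvd)
          omega
        have hacc := pdList_succ_pos (i := i) (b := d.toNat)
          ⟨hdprime, by rw [hcast]; exact hdvd.trans hni⟩
        rw [hcast] at hacc
        have haccm : (pdList i d.toNat).map (fun p => ((p, i) : Int × Int)) ++ [(d, i)] =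
            (pdList i (d.toNat + 1)).map (fun p => (p, i)) := by
          rw [hacc, List.map_append]; rfl
        rw [haccm, show d.toNat + 1 = (d + 1).toNat from by omega]
        have hsle := stripFac_le n d
        have hspos := stripFac_pos (d := d) hn
        have hsdvd := stripFac_dvd n d
        have hsnd := stripFac_not_dvd hd hn
        refine ih ((stripFac n d + 1 - (d + 1)).toNat) (by omega) (stripFac n d) (d + 1)
          rfl (by omega) hspos (hsdvd.trans hni) ?_ ?_
        · intro p hp hpn'
          have h5 := inv5 p hp (hpn'.trans hsdvd)
          have hne : (p:Int) ≠ d := fun he => hsnd (he ▸ hpn')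
          omega
        · intro p hp hdp
          rw [inv6 p hp (by omega)]
          exact (stripFac_dvd_iff hp hdprime (by omega) hd hn).symm
      · rw [if_neg hm]
        have hndvd : ¬ d ∣ n := fun h => hm ((PySem.Int.mod_eq_zero_iff_dvd n d).mpr h)
        have hacc : pdList i d.toNat = pdList i (d.toNat + 1) := by
          refine (pdList_succ_neg ?_).symm
          rintro ⟨hpp, hpi⟩
          exact hndvd (hcast ▸ (inv6 d.toNat hpp (by omega)).mp hpi)
        rw [hacc, show d.toNat + 1 = (d + 1).toNat from by omega]
        refine ih ((n + 1 - (d + 1)).toNat) (by omega) n (d + 1) rfl (by omega) hn hni ?_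
          (fun p hp hdp => inv6 p hp (by omega))
        intro p hp hpn
        have := inv5 p hp hpn
        have hne : (p:Int) ≠ d := fun he => hndvd (he ▸ hpn)
        omega
    · rw [if_neg hdd]
      by_cases h1 : 1 < n
      · rw [if_pos h1]
        have hcastn : ((n.toNat : Nat) : Int) = n := by omega
        -- the remaining cofactor n is prime: all its prime factors are ≥ d and d*d > n
        have hnprime : n.toNat.Prime := by
          by_contra hnp
          obtain ⟨p, hp, hpd, hplt⟩ := composite_small_prime (by omega) hnp
          have hpge := inv5 p hp hpd
          have hp2 : (2:Int) ≤ (p:Int) := by exact_mod_cast hp.two_le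
          have hmul : n / (p:Int) * (p:Int) = n := Int.ediv_mul_cancel hpd
          have hm2 : 2 ≤ n / (p:Int) := by nlinarith
          obtain ⟨q, hq, hqd, hqm⟩ := exists_prime_dvd hm2
          have hqn : (q:Int) ∣ n := hqd.trans ⟨(p:Int), hmul.symm⟩
          have hqge := inv5 q hq hqn
          nlinarith
        have hnd : d ≤ n := by
          have := inv5 n.toNat hnprime (by rw [hcastn])
          omega
        have hnlei : n ≤ i := Int.le_of_dvd (by omega) hni
        have e1 : pdList i (i.toNat + 1) = pdList i (n.toNat + 1) := by
          refine pdList_stable (by omega) ?_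
          rintro p hp1 hp2 ⟨hpp, hpi⟩
          have hpn : (p:Int) ∣ n := (inv6 p hpp (by omega)).mp hpi
          have := Int.le_of_dvd (by omega) hpn
          omega
        have e2 : pdList i (n.toNat + 1) = pdList i n.toNat ++ [n] := by
          have := pdList_succ_pos (i := i) (b := n.toNat) ⟨hnprime, by rw [hcastn]; exact hni⟩
          rwa [hcastn] at this
        have e3 : pdList i n.toNat = pdList i d.toNat := by
          refine pdList_stable (by omega) ?_
          rintro p hp1 hp2 ⟨hpp, hpi⟩
          have hpn : (p:Int) ∣ n := (inv6 p hpp (by omega)).mp hpi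
          have := prime_int_dvd_prime hpp hnprime (hcastn ▸ hpn)
          omega
        rw [e1, e2, List.map_append, e3]
        rfl
      · rw [if_neg h1]
        have hn1 : n = 1 := by omega
        -- no prime ≥ d divides i: it would divide n = 1
        have hnone : ∀ p : Nat, d.toNat ≤ p → ¬ (p.Prime ∧ (p:Int) ∣ i) := by
          rintro p hp ⟨hpp, hpi⟩
          have hpn : (p:Int) ∣ n := (inv6 p hpp (by omega)).mp hpi
          have := Int.le_of_dvd (by omega) hpn
          have := hpp.two_le
          omega
        rcases le_total d.toNat (i.toNat + 1) with hcmp | hcmp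
        · rw [pdList_stable hcmp (fun p hp1 _ => hnone p hp1)]
        · rw [pdList_stable hcmp (fun p hp1 hp2 h => by
            obtain ⟨hpp, hpi⟩ := h
            have := Int.le_of_dvd (by omega : (0:Int) < i) hpi
            omega)]

theorem pdList_two (i : Int) : pdList i 2 = [] := by
  simp [pdList, List.range_succ, Nat.not_prime_one, Nat.not_prime_zero]

theorem inner_eq (i : Int) :
    (divLoop i 2 []).map (fun d => ((d, i) : Int × Int)) = altLoop i i 2 [] := by
  rcases (by omega : 2 ≤ i ∨ i < 2) with hi | hi
  · have hA := divLoop_inv i hi _ 2 rfl (Or.inl rfl)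
    have hB := altLoop_inv i hi _ i 2 rfl (by omega) (by omega) dvd_rfl
          (fun p hp _ => by exact_mod_cast hp.two_le)
          (fun p _ _ => Iff.rfl)
    rw [show ((2:Int)).toNat = 2 from rfl, pdList_two i] at hA hB
    rw [hA]
    exact hB.symm
  · rw [divLoop, if_neg (by omega), altLoop, if_neg (by nlinarith), if_neg (by omega)]
    rfl

-- the cache only ever holds correct factorisations, so the memoised fold is a map
theorem memo_fold :
    ∀ (inputs : List Int) (cache : PySem.Dict Int (List (Int × Int)))
      (res : List (List (Int × Int))),
    (∀ j v, cache.get? j = some v → v = altLoop j j 2 []) →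
    (inputs.foldl memoStep (cache, res)).2 = res ++ inputs.map (fun i => altLoop i i 2 []) := by
  intro inputs
  induction inputs with
  | nil => intro cache res _; simp
  | cons i tl ih =>
    intro cache res hcache
    rw [List.foldl_cons]
    cases hget : cache.get? i with
    | some pairs =>
      rw [show memoStep (cache, res) i = (cache, res ++ [pairs]) from by
            simp [memoStep, hget]]
      rw [ih cache (res ++ [pairs]) hcache, hcache i pairs hget]
      simp
    | none =>
      rw [show memoStep (cache, res) i =
            (cache.insert i (altLoop i i 2 []), res ++ [altLoop i i 2 []]) from by
            simp [memoStep, hget]]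
      rw [ih _ _ (fun j v hj => by
            rw [PySem.Dict.get?_insert] at hj
            by_cases hji : j = i
            · rw [if_pos hji] at hj; cases hj; rw [hji]
            · rw [if_neg hji] at hj; exact hcache j v hj)]
      simp

-- ===== VERDICT (by name: the statement is the Claim_ definition above) =====
theorem divisor_map_spec : Claim_equal_divisor_map := by
  intro inputs _
  unfold Spec_divisor_map divisor_map divisor_map_alt
  rw [PySem.List.foldl_append_singleton_eq_map]
  rw [memo_fold inputs PySem.Dict.empty []
        (fun j v hj => by rw [PySem.Dict.get?_empty] at hj; cases hj)]
  simpa using List.map_congr_left (fun i _ => inner_eq i)
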